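-- pv_equiv track=rewrite | github.com/samgensburg/adventofcode | 2023/13.py | find_row_a
-- ===== SOURCE A (Python) =====
-- def find_row_a(pattern):
-- 	row_count = len(pattern)
-- 	for reflection_row in range(1, row_count):
-- 		reflection = True
-- 		for i in range(row_count):
-- 			if i < reflection_row:
-- 				reflected_i = reflection_row * 2 - i - 1
-- 				if reflected_i < row_count:
-- 					if pattern[i] != pattern[reflected_i]:
-- 						reflection = False
-- 						break
-- 			else:
-- 				reflected_i = reflection_row * 2 - 1 - i
-- 				if reflected_i >= 0:
-- 					if pattern[i] != pattern[reflected_i]: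
-- 						reflection = False
-- 						break
-- 		if reflection:
-- 			return reflection_row
-- 	return -1
-- ===== SOURCE B (Python) =====
-- def find_row_a(pattern):
--     n = len(pattern)
--     valid = [True] * n
--     for i in range(n):
--         for j in range(i + 1, n, 2):
--             if pattern[i] != pattern[j]:
--                 valid[(i + j + 1) // 2] = False
--     for r in range(1, n):
--         if valid[r]:
--             return r
--     return -1
-- ===== Notes on version B (the rewrite author's own statement) =====
-- stated objective: alternative
-- what changed: B replaces A's per-candidate verification (for each reflection row, rescan all rows with reflected-index arithmetic and early exit) by a pair-sieve: a single sweep over all mirrored row pairs (i,j) with i+j odd marks center (i+j+1)//2 invalid in a boolean table on mismatch, then a separate scan returns the first surviving center.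
import Mathlib
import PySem

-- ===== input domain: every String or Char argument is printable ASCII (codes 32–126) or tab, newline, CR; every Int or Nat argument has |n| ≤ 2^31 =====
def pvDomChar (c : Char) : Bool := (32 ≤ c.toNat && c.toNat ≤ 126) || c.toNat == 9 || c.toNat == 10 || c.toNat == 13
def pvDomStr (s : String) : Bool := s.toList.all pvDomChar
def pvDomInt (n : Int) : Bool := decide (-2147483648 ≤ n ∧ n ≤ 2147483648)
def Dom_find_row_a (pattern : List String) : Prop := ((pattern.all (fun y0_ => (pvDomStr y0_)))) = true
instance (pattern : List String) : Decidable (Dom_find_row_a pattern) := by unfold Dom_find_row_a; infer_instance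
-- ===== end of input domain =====

-- B replaces A's per-candidate verification loops (with early exit) by a pair-sieve:
-- one sweep over all mirrored row pairs marks invalid centers in a table, then the
-- first surviving center is returned. Objective: alternative decomposition.

-- ===== PORT A =====
-- inner loop body for a single i (all indices used are in range, so getD is exact);
-- 'reflected_i ≥ 0' in Python's else-branch is 'i < 2*r' here (same condition on Nat).
def pvA_check (pattern : List String) (r i : Nat) : Bool :=
  if i < r then
    (if r * 2 - i - 1 < pattern.length then
       pattern.getD i "" == pattern.getD (r * 2 - i - 1) "" else true)
  else
    (if i < 2 * r then
       pattern.getD i "" == pattern.getD (r * 2 - 1 - i) "" else true)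

-- 'for i in range(row_count)' with break: stops at the first failing i
def pvA_inner (pattern : List String) (r : Nat) : List Nat → Bool
  | [] => true
  | i :: rest => if pvA_check pattern r i then pvA_inner pattern r rest else false

-- 'for reflection_row in range(1, row_count)' with early return
def pvA_outer (pattern : List String) : List Nat → Int
  | [] => -1
  | r :: rest =>
    if pvA_inner pattern r (List.range pattern.length) then (r : Int)
    else pvA_outer pattern rest

def find_row_a (pattern : List String) : Int :=
  pvA_outer pattern (List.range' 1 (pattern.length - 1))

-- ===== PORT B =====
-- 'if pattern[i] != pattern[j]: valid[(i+j+1)//2] = False' (indices always in range, so getD is exact)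
def pvB_step (pattern : List String) (i : Nat) (v : List Bool) (j : Nat) : List Bool :=
  if pattern.getD i "" != pattern.getD j "" then v.set ((i + j + 1) / 2) false else v

-- 'range(i+1, n, 2)' = List.range' (i+1) ((n-i)/2) 2 (same elements, same order)
def pvB_table (pattern : List String) : List Bool :=
  (List.range pattern.length).foldl
    (fun v i => (List.range' (i + 1) ((pattern.length - i) / 2) 2).foldl (pvB_step pattern i) v)
    (List.replicate pattern.length true)

-- 'for r in range(1, n): if valid[r]: return r'
def pvB_scan (v : List Bool) : List Nat → Int
  | [] => -1
  | r :: rest => if v.getD r false then (r : Int) else pvB_scan v rest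

def find_row_a_alt (pattern : List String) : Int :=
  pvB_scan (pvB_table pattern) (List.range' 1 (pattern.length - 1))

-- ===== PRECONDITION & SPEC =====
def Spec_find_row_a (pattern : List String) (out : Int) : Prop := out = find_row_a_alt pattern
instance (pattern : List String) (out : Int) : Decidable (Spec_find_row_a pattern out) := by unfold Spec_find_row_a; infer_instance

-- ===== CLAIM (what is proved, stated in full; the proofs are below) =====
def Claim_equal_find_row_a : Prop := ∀ (pattern : List String), Dom_find_row_a pattern → Spec_find_row_a pattern (find_row_a pattern)

-- ===== LEMMAS AND PROOFS =====

-- the common characterisation: all mirrored pairs around r agree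
def pvPairs (pattern : List String) (r : Nat) : Prop :=
  ∀ k, k < min r (pattern.length - r) →
    pattern.getD (r - 1 - k) "" = pattern.getD (r + k) ""

-- "no mirrored pair with center r disagrees", stated over raw index pairs
def pvOK (pattern : List String) (r : Nat) : Prop :=
  ∀ i j : Nat, i < j → j < pattern.length → i + j + 1 = 2 * r →
    pattern.getD i "" = pattern.getD j ""

-- A's inner loop (with break) is List.all of the per-index check
theorem pvA_inner_all (pattern : List String) (r : Nat) (l : List Nat) :
    pvA_inner pattern r l = l.all (pvA_check pattern r) := by
  induction l with
  | nil => rfl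
  | cons i rest ih =>
    simp only [pvA_inner, List.all_cons, ih]
    cases pvA_check pattern r i <;> simp

theorem pvA_check_iff (pattern : List String) (r : Nat) (hr1 : 1 ≤ r)
    (hrn : r < pattern.length) :
    pvA_inner pattern r (List.range pattern.length) = true ↔ pvPairs pattern r := by
  rw [pvA_inner_all, List.all_eq_true]
  constructor
  · intro h k hk
    have hk1 : k < r := lt_of_lt_of_le hk (min_le_left _ _)
    have hk2 : k < pattern.length - r := lt_of_lt_of_le hk (min_le_right _ _)
    have hi : r - 1 - k < pattern.length := by omega
    have := h (r - 1 - k) (by simpa using hi)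
    have hri : r * 2 - (r - 1 - k) - 1 = r + k := by omega
    simp only [pvA_check, hri, if_pos (show r - 1 - k < r by omega),
      if_pos (show r + k < pattern.length by omega)] at this
    exact of_decide_eq_true this
  · intro h i hi
    simp only [List.mem_range] at hi
    unfold pvA_check
    split_ifs with h1 h2 h3
    · have hk : r - 1 - i < min r (pattern.length - r) := by omega
      have := h (r - 1 - i) hk
      have e1 : r - 1 - (r - 1 - i) = i := by omega
      have e2 : r + (r - 1 - i) = r * 2 - i - 1 := by omega
      rw [e1, e2] at this
      exact decide_eq_true this
    · rfl
    · have hk : i - r < min r (pattern.length - r) := by omega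
      have := h (i - r) hk
      have e1 : r - 1 - (i - r) = r * 2 - 1 - i := by omega
      have e2 : r + (i - r) = i := by omega
      rw [e1, e2] at this
      exact decide_eq_true this.symm
    · rfl

-- B's sieve step preserves the table length
theorem pvB_step_length (pattern : List String) (i : Nat) (v : List Bool) (j : Nat) :
    (pvB_step pattern i v j).length = v.length := by
  unfold pvB_step; split <;> simp

theorem pvB_fold_length (pattern : List String) (i : Nat) (L : List Nat) (v : List Bool) :
    (L.foldl (pvB_step pattern i) v).length = v.length := by
  induction L generalizing v with
  | nil => rfl
  | cons j rest ih => simp [List.foldl_cons, ih, pvB_step_length]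

-- entry r of the table after one inner sweep (fixed i, any list of j's)
theorem pvB_fold_getD (pattern : List String) (i r : Nat) (L : List Nat) (v : List Bool)
    (hr : r < v.length) :
    ((L.foldl (pvB_step pattern i) v).getD r false = true ↔
      (v.getD r false = true ∧ ∀ j ∈ L, (i + j + 1) / 2 = r →
        pattern.getD i "" = pattern.getD j "")) := by
  induction L generalizing v with
  | nil => simp
  | cons j rest ih =>
    simp only [List.foldl_cons]
    have hstep : r < (pvB_step pattern i v j).length := by rw [pvB_step_length]; exact hr
    rw [ih _ hstep]
    cases hbe : pattern.getD i "" != pattern.getD j "" with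
    | false =>
      have heq : pattern.getD i "" = pattern.getD j "" := by simpa using hbe
      have hv : pvB_step pattern i v j = v := by
        simp only [pvB_step]; rw [hbe]; simp
      rw [hv]
      constructor
      · rintro ⟨h1, h2⟩
        refine ⟨h1, fun j' hj' hcj' => ?_⟩
        rcases List.mem_cons.mp hj' with h | h
        · subst h; exact heq
        · exact h2 j' h hcj'
      · rintro ⟨h1, h2⟩
        exact ⟨h1, fun j' hj' => h2 j' (List.mem_cons_of_mem _ hj')⟩
    | true =>
      have hne : pattern.getD i "" ≠ pattern.getD j "" := by simpa using hbe
      have hv : pvB_step pattern i v j = v.set ((i + j + 1) / 2) false := by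
        simp only [pvB_step]; rw [hbe]; simp
      rw [hv]
      by_cases hc : (i + j + 1) / 2 = r
      · have hfalse : (v.set ((i + j + 1) / 2) false).getD r false = false := by
          simp [List.getD_eq_getElem?_getD, hc, hr]
        rw [hfalse]
        constructor
        · rintro ⟨h1, _⟩
          exact absurd h1 (by simp)
        · rintro ⟨_, h2⟩
          exact absurd (h2 j (List.mem_cons_self ..) hc) hne
      · have hkeep : (v.set ((i + j + 1) / 2) false).getD r false = v.getD r false := by
          simp [List.getD_eq_getElem?_getD, hc]
        rw [hkeep]
        constructor
        · rintro ⟨h1, h2⟩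
          refine ⟨h1, fun j' hj' hcj' => ?_⟩
          rcases List.mem_cons.mp hj' with h | h
          · subst h; exact absurd hcj' hc
          · exact h2 j' h hcj'
        · rintro ⟨h1, h2⟩
          exact ⟨h1, fun j' hj' => h2 j' (List.mem_cons_of_mem _ hj')⟩

-- entry r of the table after the full double sweep
theorem pvB_double_fold_getD (pattern : List String) (r : Nat) (Li : List Nat) (v : List Bool)
    (hr : r < v.length) :
    (((Li.foldl (fun v i =>
        (List.range' (i + 1) ((pattern.length - i) / 2) 2).foldl (pvB_step pattern i) v) v).getD
        r false = true) ↔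
      (v.getD r false = true ∧ ∀ i ∈ Li,
        ∀ j ∈ List.range' (i + 1) ((pattern.length - i) / 2) 2,
          (i + j + 1) / 2 = r → pattern.getD i "" = pattern.getD j "")) := by
  induction Li generalizing v with
  | nil => simp
  | cons i rest ih =>
    simp only [List.foldl_cons]
    have hlen : r < ((List.range' (i + 1) ((pattern.length - i) / 2) 2).foldl
        (pvB_step pattern i) v).length := by rw [pvB_fold_length]; exact hr
    rw [ih _ hlen, pvB_fold_getD pattern i r _ v hr]
    constructor
    · rintro ⟨⟨h1, h2⟩, h3⟩
      refine ⟨h1, ?_⟩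
      intro i' hi'
      rcases List.mem_cons.mp hi' with h | h
      · subst h; exact h2
      · exact h3 i' h
    · rintro ⟨h1, h2⟩
      exact ⟨⟨h1, h2 i (List.mem_cons_self ..)⟩,
        fun i' hi' => h2 i' (List.mem_cons_of_mem _ hi')⟩

theorem pvB_table_getD (pattern : List String) (r : Nat) (hr : r < pattern.length) :
    ((pvB_table pattern).getD r false = true ↔ pvOK pattern r) := by
  unfold pvB_table
  rw [pvB_double_fold_getD pattern r _ _ (by simpa using hr)]
  have hinit : (List.replicate pattern.length true).getD r false = true := by
    simp [List.getD_eq_getElem?_getD, hr]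
  simp only [hinit, true_and]
  constructor
  · intro h i j hij hjn hsum
    have hi : i ∈ List.range pattern.length := by
      rw [List.mem_range]; omega
    have hj : j ∈ List.range' (i + 1) ((pattern.length - i) / 2) 2 := by
      rw [List.mem_range']
      exact ⟨(j - i - 1) / 2, by omega, by omega⟩
    exact h i hi j hj (by omega)
  · intro h i hi j hj hc
    rw [List.mem_range] at hi
    rw [List.mem_range'] at hj
    obtain ⟨k, hk, hjk⟩ := hj
    exact h i j (by omega) (by omega) (by omega)

theorem pvOK_iff_pairs (pattern : List String) (r : Nat) (_hr1 : 1 ≤ r)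
    (hrn : r < pattern.length) :
    pvOK pattern r ↔ pvPairs pattern r := by
  constructor
  · intro h k hk
    have hk1 : k < r := lt_of_lt_of_le hk (min_le_left _ _)
    have hk2 : k < pattern.length - r := lt_of_lt_of_le hk (min_le_right _ _)
    exact h (r - 1 - k) (r + k) (by omega) (by omega) (by omega)
  · intro h i j hij hjn hsum
    have hk : j - r < min r (pattern.length - r) := by omega
    have := h (j - r) hk
    have e1 : r - 1 - (j - r) = i := by omega
    have e2 : r + (j - r) = j := by omega
    rw [e1, e2] at this
    exact this

-- the two top-level scans agree element by element
theorem pv_loops_eq (pattern : List String) (l : List Nat)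
    (hl : ∀ r ∈ l, 1 ≤ r ∧ r < pattern.length) :
    pvA_outer pattern l = pvB_scan (pvB_table pattern) l := by
  induction l with
  | nil => rfl
  | cons r rest ih =>
    obtain ⟨h1, h2⟩ := hl r (List.mem_cons_self ..)
    have hcheck : pvA_inner pattern r (List.range pattern.length)
        = (pvB_table pattern).getD r false := by
      have hiff := (pvA_check_iff pattern r h1 h2).trans
        ((pvOK_iff_pairs pattern r h1 h2).symm.trans
          (pvB_table_getD pattern r h2).symm)
      cases ha : pvA_inner pattern r (List.range pattern.length) <;>
        cases hb : (pvB_table pattern).getD r false <;> simp_all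
    simp only [pvA_outer, pvB_scan, hcheck]
    split
    · rfl
    · exact ih (fun r' hr' => hl r' (List.mem_cons_of_mem _ hr'))

-- ===== VERDICT (by name: the statement is the Claim_ definition above) =====
theorem find_row_a_spec : Claim_equal_find_row_a := by
  intro pattern _
  unfold Spec_find_row_a find_row_a find_row_a_alt
  apply pv_loops_eq
  intro r hr
  rw [List.mem_range'] at hr
  obtain ⟨i, hi, hri⟩ := hr
  omega
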